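-- pv_equiv track=rewrite | github.com/felixhuict/felixhuict | game/wordle.py | render_keyboard
-- ===== SOURCE A (Python) =====
-- def render_keyboard(guesses_scored):
--     """Render a keyboard showing letter statuses."""
--     letter_status = {}
--     priority = {"correct": 3, "present": 2, "absent": 1}
--
--     for scored in guesses_scored:
--         for letter, status in scored:
--             current = letter_status.get(letter, ("unused", 0))
--             if priority.get(status, 0) > current[1]:
--                 letter_status[letter] = (status, priority[status])
--
--     rows = ["QWERTYUIOP", "ASDFGHJKL", "ZXCVBNM"]
--     style_map = {"correct": "🟩", "present": "🟨", "absent": "⬛", "unused": "⬜"}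
--
--     keyboard_lines = []
--     for row in rows:
--         line = " ".join(f"{style_map[letter_status.get(c, ('unused', 0))[0]]}`{c}`" for c in row)
--         keyboard_lines.append(line)
--
--     return "\n".join(keyboard_lines)
-- ===== SOURCE B (Python) =====
-- def render_keyboard(guesses_scored):
--     """Render a keyboard showing letter statuses."""
--     # Ordered-overwrite: process statuses from lowest to highest priority,
--     # so the last assignment to a letter is its best status.
--     letter_status = {}
--     for status in ("absent", "present", "correct"):
--         for scored in guesses_scored:
--             for letter, st in scored:
--                 if st == status:
--                     letter_status[letter] = status
--
--     style_map = {"correct": "🟩", "present": "🟨", "absent": "⬛", "unused": "⬜"}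
--
--     def tile(c):
--         return style_map[letter_status.get(c, "unused")] + "`" + c + "`"
--
--     return "\n".join(
--         " ".join(tile(c) for c in row)
--         for row in ("QWERTYUIOP", "ASDFGHJKL", "ZXCVBNM")
--     )
-- ===== Notes on version B (the rewrite author's own statement) =====
-- stated objective: simpler
-- what changed: Replaces A's single pass that tracks a (status, priority-number) pair per letter via a max-comparison with three ordered overwrite passes (absent, then present, then correct) that store only the plain status string, so a later pass simply overwrites lower-priority entries and no priority bookkeeping is needed; the rendering is a direct nested join over rows instead of an accumulator loop.
import Mathlib
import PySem

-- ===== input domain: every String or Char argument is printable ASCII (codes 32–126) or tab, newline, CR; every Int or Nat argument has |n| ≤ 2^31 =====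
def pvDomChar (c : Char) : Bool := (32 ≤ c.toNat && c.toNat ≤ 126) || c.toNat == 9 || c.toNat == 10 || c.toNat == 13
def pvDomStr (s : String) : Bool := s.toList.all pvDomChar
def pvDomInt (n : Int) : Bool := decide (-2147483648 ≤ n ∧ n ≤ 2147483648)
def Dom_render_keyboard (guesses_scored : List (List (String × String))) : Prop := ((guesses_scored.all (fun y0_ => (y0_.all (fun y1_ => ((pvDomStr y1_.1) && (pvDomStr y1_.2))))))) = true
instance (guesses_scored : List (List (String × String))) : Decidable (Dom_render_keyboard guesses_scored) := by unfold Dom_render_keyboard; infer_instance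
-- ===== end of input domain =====

-- ===== PORT A =====
-- B (below) replaces A's per-pair max-priority bookkeeping by three ordered overwrite passes; objective: simpler (no speed claim).
-- A-side helpers (the dict/style tables and loop body of Source A, step for step)
def pvPriority : PySem.Dict String Int := PySem.Dict.ofList [("correct", 3), ("present", 2), ("absent", 1)]

-- the style_map literal (identical in Source A and Source B; shared here)
def pvStyle : PySem.Dict String String :=
  PySem.Dict.ofList [("correct", "🟩"), ("present", "🟨"), ("absent", "⬛"), ("unused", "⬜")]

-- body of A's inner 'for letter, status in scored' loop
def pvStepA (d : PySem.Dict String (String × Int)) (p : String × String) : PySem.Dict String (String × Int) :=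
  let current := d.getD p.1 ("unused", 0)
  if pvPriority.getD p.2 0 > current.2 then d.insert p.1 (p.2, pvPriority.getD p.2 0) else d

def render_keyboard (guesses_scored : List (List (String × String))) : String :=
  let letter_status : PySem.Dict String (String × Int) :=
    guesses_scored.foldl (fun d scored => scored.foldl pvStepA d) PySem.Dict.empty
  let rows := ["QWERTYUIOP", "ASDFGHJKL", "ZXCVBNM"]
  -- style_map[…] : the looked-up key is always one of pvStyle's four keys, so Python's [] never
  -- raises here; getD with an unreachable "" default is exact.
  let keyboard_lines : List String :=
    rows.foldl (fun acc row =>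
      acc ++ [PySem.Str.join " " (row.toList.map (fun c =>
        pvStyle.getD (letter_status.getD (String.singleton c) ("unused", 0)).1 "" ++ "`" ++ String.singleton c ++ "`"))]) []
  PySem.Str.join "\n" keyboard_lines

-- ===== PORT B =====
-- B-side helpers (Source B step for step)
-- body of Source B's innermost 'if st == status: letter_status[letter] = status'
def pvStepB (status : String) (d : PySem.Dict String String) (p : String × String) : PySem.Dict String String :=
  if p.2 = status then d.insert p.1 status else d

-- Source B's local 'tile(c)'; style_map[…] again only ever sees the four present keys
def pvTileB (letter_status : PySem.Dict String String) (c : Char) : String :=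
  pvStyle.getD (letter_status.getD (String.singleton c) "unused") "" ++ "`" ++ String.singleton c ++ "`"

def render_keyboard_alt (guesses_scored : List (List (String × String))) : String :=
  let letter_status : PySem.Dict String String :=
    ["absent", "present", "correct"].foldl (fun d status =>
      guesses_scored.foldl (fun d scored => scored.foldl (pvStepB status) d) d) PySem.Dict.empty
  PySem.Str.join "\n" (["QWERTYUIOP", "ASDFGHJKL", "ZXCVBNM"].map (fun row =>
    PySem.Str.join " " (row.toList.map (pvTileB letter_status))))

-- ===== PRECONDITION & SPEC =====
def Spec_render_keyboard (guesses_scored : List (List (String × String))) (out : String) : Prop := out = render_keyboard_alt guesses_scored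
instance (guesses_scored : List (List (String × String))) (out : String) : Decidable (Spec_render_keyboard guesses_scored out) := by unfold Spec_render_keyboard; infer_instance

-- ===== CLAIM (what is proved, stated in full; the proofs are below) =====
def Claim_equal_render_keyboard : Prop := ∀ (guesses_scored : List (List (String × String))), Dom_render_keyboard guesses_scored → Spec_render_keyboard guesses_scored (render_keyboard guesses_scored)

-- ===== LEMMAS AND PROOFS =====

-- the best priority among the statuses recorded for key k in the flat pair list
def pvBest (k : String) (pairs : List (String × String)) : Int :=
  if pairs.any (fun p => p.1 = k ∧ p.2 = "correct") then 3
  else if pairs.any (fun p => p.1 = k ∧ p.2 = "present") then 2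
  else if pairs.any (fun p => p.1 = k ∧ p.2 = "absent") then 1
  else 0

-- the (status, priority) pair A stores for a given priority level
def pvStat (n : Int) : String × Int :=
  if n = 3 then ("correct", 3) else if n = 2 then ("present", 2) else if n = 1 then ("absent", 1) else ("unused", 0)

theorem pvBest_nonneg (k pairs) : 0 ≤ pvBest k pairs := by
  unfold pvBest; split_ifs <;> norm_num

theorem pvBest_le_three (k pairs) : pvBest k pairs ≤ 3 := by
  unfold pvBest; split_ifs <;> norm_num

theorem pvStat_snd (n : Int) (h0 : 0 ≤ n) (h3 : n ≤ 3) : (pvStat n).2 = n := by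
  unfold pvStat; split_ifs <;> omega

theorem pvPriority_getD (s : String) :
    pvPriority.getD s 0 = if s = "correct" then 3 else if s = "present" then 2 else if s = "absent" then 1 else 0 := by
  by_cases h1 : s = "correct" <;> by_cases h2 : s = "present" <;> by_cases h3 : s = "absent" <;>
    simp_all [pvPriority, PySem.Dict.ofList, PySem.Dict.update, PySem.Dict.getD_eq_get?_getD, PySem.Dict.get?_insert]

-- A's dict fold, observed at one key, is a scalar fold over the pairs
theorem foldA_getD (pairs : List (String × String)) :
    ∀ (d : PySem.Dict String (String × Int)) (k : String),
    (pairs.foldl pvStepA d).getD k ("unused", 0) =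
      pairs.foldl (fun cur p => if p.1 = k then
          (if pvPriority.getD p.2 0 > cur.2 then (p.2, pvPriority.getD p.2 0) else cur) else cur)
        (d.getD k ("unused", 0)) := by
  induction pairs with
  | nil => intro d k; rfl
  | cons p rest ih =>
    intro d k
    simp only [List.foldl_cons, ih, pvStepA]
    by_cases hc : (d.getD p.1 ("unused", 0)).2 < pvPriority.getD p.2 0
    · by_cases hk : p.1 = k
      · subst hk
        simp [hc, PySem.Dict.getD_insert]
      · simp [hc, hk, PySem.Dict.getD_insert, show ¬ k = p.1 from fun h => hk h.symm]
    · by_cases hk : p.1 = k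
      · rw [hk] at hc ⊢
        simp [hc]
      · rw [if_neg hc, if_neg hk]

-- the scalar fold computes pvStat of the running max priority
theorem scalarA (k : String) (pairs : List (String × String)) :
    ∀ (n : Int), 0 ≤ n → n ≤ 3 →
    pairs.foldl (fun cur p => if p.1 = k then
        (if pvPriority.getD p.2 0 > cur.2 then (p.2, pvPriority.getD p.2 0) else cur) else cur)
      (pvStat n) = pvStat (max n (pvBest k pairs)) := by
  induction pairs with
  | nil =>
    intro n h0 h3
    simp [pvBest]
    congr 1
    omega
  | cons p rest ih =>
    intro n h0 h3
    simp only [List.foldl_cons]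
    by_cases hk : p.1 = k
    · rw [pvPriority_getD, pvStat_snd n h0 h3]
      by_cases c1 : p.2 = "correct"
      · have step : (if p.1 = k then
            (if (if p.2 = "correct" then (3:Int) else if p.2 = "present" then 2 else if p.2 = "absent" then 1 else 0) > n
              then (p.2, if p.2 = "correct" then (3:Int) else if p.2 = "present" then 2 else if p.2 = "absent" then 1 else 0)
              else pvStat n) else pvStat n) = pvStat (max n 3) := by
          simp only [hk, c1, if_pos rfl, if_true]
          by_cases h : (3:Int) > n
          · simp [h, pvStat, c1]; omega
          · have : n = 3 := by omega
            simp [h, this]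
        rw [step, ih (max n 3) (by omega) (by omega)]
        congr 1
        have h1 := pvBest_le_three k rest
        have : pvBest k (p :: rest) = 3 := by simp [pvBest, hk, c1]
        omega
      · by_cases c2 : p.2 = "present"
        · have step : (if p.1 = k then
              (if (if p.2 = "correct" then (3:Int) else if p.2 = "present" then 2 else if p.2 = "absent" then 1 else 0) > n
                then (p.2, if p.2 = "correct" then (3:Int) else if p.2 = "present" then 2 else if p.2 = "absent" then 1 else 0)
                else pvStat n) else pvStat n) = pvStat (max n 2) := by
            simp only [hk, c1, c2, if_true]
            by_cases h : (2:Int) > n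
            · have heq : max n 2 = 2 := by omega
              rw [heq]; simp [pvStat, c2, h]
            · have heq : max n 2 = n := by omega
              rw [heq]; simp [h]
          rw [step, ih (max n 2) (by omega) (by omega)]
          congr 1
          have hb : pvBest k (p :: rest) =
              if rest.any (fun p => p.1 = k ∧ p.2 = "correct") then 3 else 2 := by
            simp [pvBest, hk, c1, c2]
          have h1 := pvBest_nonneg k rest
          have h2 := pvBest_le_three k rest
          unfold pvBest at *
          split_ifs at * <;> omega
        · by_cases c3 : p.2 = "absent"
          · have step : (if p.1 = k then
                (if (if p.2 = "correct" then (3:Int) else if p.2 = "present" then 2 else if p.2 = "absent" then 1 else 0) > n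
                  then (p.2, if p.2 = "correct" then (3:Int) else if p.2 = "present" then 2 else if p.2 = "absent" then 1 else 0)
                  else pvStat n) else pvStat n) = pvStat (max n 1) := by
              simp only [hk, c1, c2, c3, if_true]
              by_cases h : (1:Int) > n
              · have hn : n = 0 := by omega
                simp [h, c1, c2, c3, pvStat, hn]
              · have heq : max n 1 = n := by omega
                simp [c1, c2, c3, h, heq]
            rw [step, ih (max n 1) (by omega) (by omega)]
            congr 1
            have h1 := pvBest_nonneg k rest
            have h2 := pvBest_le_three k rest
            have hb : pvBest k (p :: rest) =
                if rest.any (fun p => p.1 = k ∧ p.2 = "correct") then 3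
                else if rest.any (fun p => p.1 = k ∧ p.2 = "present") then 2 else 1 := by
              simp [pvBest, hk, c1, c2, c3]
            unfold pvBest at *
            split_ifs at * <;> omega
          · -- unknown status: priority 0, never beats n ≥ 0; pvBest ignores it
            have step : (if p.1 = k then
                (if (if p.2 = "correct" then (3:Int) else if p.2 = "present" then 2 else if p.2 = "absent" then 1 else 0) > n
                  then (p.2, if p.2 = "correct" then (3:Int) else if p.2 = "present" then 2 else if p.2 = "absent" then 1 else 0)
                  else pvStat n) else pvStat n) = pvStat n := by
              simp [hk, c1, c2, c3]
              omega
            rw [step, ih n h0 h3]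
            congr 1
            simp [pvBest, c1, c2, c3]
    · simp only [hk, if_false]
      rw [ih n h0 h3]
      congr 1
      simp [pvBest, hk]

-- B's one overwrite pass for a fixed status, observed at one key
theorem passB_getD (s : String) (pairs : List (String × String)) :
    ∀ (d : PySem.Dict String String) (k : String),
    (pairs.foldl (pvStepB s) d).getD k "unused" =
      if pairs.any (fun p => p.1 = k ∧ p.2 = s) then s else d.getD k "unused" := by
  induction pairs with
  | nil => intro d k; simp
  | cons p rest ih =>
    intro d k
    simp only [List.foldl_cons, pvStepB, List.any_cons]
    by_cases hs : p.2 = s <;> by_cases hk : p.1 = k <;>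
      simp [hs, hk, ih, PySem.Dict.getD_insert] <;> split_ifs <;> simp_all

-- the two letter-status tables agree (as the status string) at every key
theorem tables_agree (guesses_scored : List (List (String × String))) (k : String) :
    ((guesses_scored.foldl (fun d scored => scored.foldl pvStepA d) PySem.Dict.empty).getD k ("unused", 0)).1 =
    (["absent", "present", "correct"].foldl (fun d status =>
        guesses_scored.foldl (fun d scored => scored.foldl (pvStepB status) d) d) PySem.Dict.empty).getD k "unused" := by
  have hA : guesses_scored.foldl (fun d scored => scored.foldl pvStepA d) PySem.Dict.empty
      = guesses_scored.flatten.foldl pvStepA PySem.Dict.empty := List.foldl_flatten.symm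
  have hB : ∀ (st : String) (d : PySem.Dict String String),
      guesses_scored.foldl (fun d scored => scored.foldl (pvStepB st) d) d
        = guesses_scored.flatten.foldl (pvStepB st) d := fun st d => List.foldl_flatten.symm
  rw [hA, foldA_getD]
  have h0 : (PySem.Dict.empty : PySem.Dict String (String × Int)).getD k ("unused", 0) = pvStat 0 := by
    simp [pvStat, PySem.Dict.getD_empty]
  rw [h0, scalarA k _ 0 le_rfl (by norm_num)]
  simp only [List.foldl_cons, List.foldl_nil, hB]
  rw [passB_getD, passB_getD, passB_getD]
  have hb0 := pvBest_nonneg k guesses_scored.flatten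
  have hmax : max (0:Int) (pvBest k guesses_scored.flatten) = pvBest k guesses_scored.flatten := by omega
  rw [hmax]
  unfold pvBest pvStat
  split_ifs <;> simp_all [PySem.Dict.getD_empty]

-- ===== VERDICT (by name: the statement is the Claim_ definition above) =====
theorem render_keyboard_spec : Claim_equal_render_keyboard := by
  intro guesses_scored _
  unfold Spec_render_keyboard
  simp only [render_keyboard, render_keyboard_alt]
  rw [PySem.List.foldl_append_singleton_eq_map]
  simp only [List.nil_append]
  congr 1
  apply List.map_congr_left
  intro row _
  congr 1
  apply List.map_congr_left
  intro c _
  unfold pvTileB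
  rw [← tables_agree]
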